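-- pv_equiv track=rewrite | github.com/RiRi-380/Lipsynctool_beta | main/analysis/hatsuon.py | _split_roman_to_phonemes
-- ===== SOURCE A (Python) =====
-- from typing import List, Dict
--
-- def _split_roman_to_phonemes(roman_str: str) -> List[str]:
--     """
--     ローマ字列を音素配列に分割するダミー。
--     例: "konnnichiwa" -> ["ko", "n", "ni", "chi", "wa"]
--     """
--     text = roman_str.lower()
--
--     patterns = [
--         "xtsu","chi","shi","tsu","kyo","kya","kyu",
--         "sho","sha","shu","cho","cha","chu",
--         "nn","n",  # n周りを先に
--         "ko","ki","ka","ku","wa","wo","na","ni","nu","no","ta","te","to","su",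
--         "ma","mi","mo","chi","a","i","u","e","o"
--         # ...
--     ]
--     # 長いもの優先でマッチ
--     patterns = sorted(patterns, key=len, reverse=True)
--
--     result = []
--     idx = 0
--     while idx < len(text):
--         matched = False
--         for p in patterns:
--             if text[idx:].startswith(p):
--                 result.append(p)
--                 idx += len(p)
--                 matched = True
--                 break
--         if not matched:
--             # 合致しない文字は1文字切り出し
--             result.append(text[idx])
--             idx += 1
--
--     return result
-- ===== SOURCE B (Python) =====
-- from typing import List
--
-- def _split_roman_to_phonemes(roman_str: str) -> List[str]:
--     """Greedy longest-match via an incremental prefix-walk: extend the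
--     candidate one character at a time while it is still a viable pattern
--     prefix, remembering the end of the last complete pattern seen."""
--     text = roman_str.lower()
--
--     patterns = [
--         "xtsu","chi","shi","tsu","kyo","kya","kyu",
--         "sho","sha","shu","cho","cha","chu",
--         "nn","n",
--         "ko","ki","ka","ku","wa","wo","na","ni","nu","no","ta","te","to","su",
--         "ma","mi","mo","chi","a","i","u","e","o"
--     ]
--     words = set(patterns)
--     prefixes = {p[:k] for p in patterns for k in range(1, len(p) + 1)}
--
--     result = []
--     i = 0
--     n = len(text)
--     while i < n:
--         best_end = i + 1  # single-character fallback
--         j = i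
--         while j < n and text[i:j + 1] in prefixes:
--             j += 1
--             if text[i:j] in words:
--                 best_end = j
--         result.append(text[i:best_end])
--         i = best_end
--     return result
-- ===== Notes on version B (the rewrite author's own statement) =====
-- stated objective: faster
-- what changed: Replaced A's per-position scan of the length-sorted 38-pattern list (each startswith test copies the whole remaining suffix text[idx:]) by an incremental prefix-walk over a precomputed pattern-prefix set: the candidate is extended one character at a time while it is still a viable prefix, remembering the end of the last complete pattern, so each position does at most 4 short slice+set probes.
import Mathlib
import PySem

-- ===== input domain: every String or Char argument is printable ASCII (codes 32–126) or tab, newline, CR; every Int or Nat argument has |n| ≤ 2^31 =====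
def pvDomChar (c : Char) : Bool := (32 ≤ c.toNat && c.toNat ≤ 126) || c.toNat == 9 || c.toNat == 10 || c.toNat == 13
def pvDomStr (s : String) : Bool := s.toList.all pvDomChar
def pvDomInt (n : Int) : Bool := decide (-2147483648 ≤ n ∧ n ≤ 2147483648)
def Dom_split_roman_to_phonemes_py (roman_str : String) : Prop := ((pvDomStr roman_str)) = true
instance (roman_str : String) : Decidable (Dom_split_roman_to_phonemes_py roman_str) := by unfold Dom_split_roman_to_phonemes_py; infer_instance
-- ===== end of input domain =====

-- B replaces A's per-position scan over the length-sorted pattern list (A copies the whole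
-- suffix text[idx:] for every startswith test) by an incremental prefix-walk: it extends the
-- candidate one character at a time while it is still a viable pattern prefix, remembering the
-- end of the last complete pattern seen (objective: faster; equal return values proved below).

-- ===== PORT A =====
-- the literal pattern list of A (duplicates and order as written)
def pvPatternsA : List (List Char) :=
  [['x', 't', 's', 'u'],
   ['c', 'h', 'i'],
   ['s', 'h', 'i'],
   ['t', 's', 'u'],
   ['k', 'y', 'o'],
   ['k', 'y', 'a'],
   ['k', 'y', 'u'],
   ['s', 'h', 'o'],
   ['s', 'h', 'a'],
   ['s', 'h', 'u'],
   ['c', 'h', 'o'],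
   ['c', 'h', 'a'],
   ['c', 'h', 'u'],
   ['n', 'n'],
   ['n'],
   ['k', 'o'],
   ['k', 'i'],
   ['k', 'a'],
   ['k', 'u'],
   ['w', 'a'],
   ['w', 'o'],
   ['n', 'a'],
   ['n', 'i'],
   ['n', 'u'],
   ['n', 'o'],
   ['t', 'a'],
   ['t', 'e'],
   ['t', 'o'],
   ['s', 'u'],
   ['m', 'a'],
   ['m', 'i'],
   ['m', 'o'],
   ['c', 'h', 'i'],
   ['a'],
   ['i'],
   ['u'],
   ['e'],
   ['o']]

-- patterns = sorted(patterns, key=len, reverse=True)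
def pvSortedPatternsA : List (List Char) := PySem.List.sorted pvPatternsA (fun p => p.length) true

-- the inner `for p in patterns: if text[idx:].startswith(p): … break` scan
def pvScanA : List (List Char) → List Char → Option (List Char)
  | [], _ => none
  | p :: ps, rest => if PySem.Chars.startswith rest p then some p else pvScanA ps rest

-- the while loop over idx, as recursion on the remaining characters (fuel = remaining length;
-- every iteration consumes ≥ 1 character, so fuel = length never runs out)
def pvLoopA : Nat → List Char → List (List Char)
  | 0, _ => []
  | _, [] => []
  | fuel + 1, c :: t =>
    match pvScanA pvSortedPatternsA (c :: t) with
    | some p => p :: pvLoopA fuel ((c :: t).drop p.length)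
    | none => [c] :: pvLoopA fuel t

def split_roman_to_phonemes_py (roman_str : String) : List String :=
  let text := (PySem.Str.lower roman_str).toList
  (pvLoopA text.length text).map (fun cs => String.ofList cs)

-- ===== PORT B =====
-- (B's Python re-states the same pattern-list literal; the shared constant pvPatternsA is the data both read)

-- words = set(patterns)
def pvWordsB : PySem.Set (List Char) := PySem.Set.ofList pvPatternsA

-- prefixes = {p[:k] for p in patterns for k in range(1, len(p) + 1)}
def pvPrefixesB : PySem.Set (List Char) :=
  PySem.Set.ofList (pvPatternsA.flatMap (fun p => (List.range p.length).map (fun k => p.take (k + 1))))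

-- the inner walk `while j < n and text[i:j+1] in prefixes: j += 1; if text[i:j] in words: best_end = j`,
-- on the suffix rest = text[i:] with j and best_end relative to i (best_end starts at i+1)
def pvWalkB (rest : List Char) (j best : Nat) : Nat :=
  if h : j < rest.length ∧ PySem.Set.contains pvPrefixesB (rest.take (j + 1)) = true then
    pvWalkB rest (j + 1) (if PySem.Set.contains pvWordsB (rest.take (j + 1)) = true then j + 1 else best)
  else best
termination_by rest.length - j
decreasing_by omega

-- the outer while loop (fuel = remaining length; each step consumes best_end - i ≥ 1 characters)
def pvLoopB : Nat → List Char → List (List Char)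
  | 0, _ => []
  | _, [] => []
  | fuel + 1, c :: t =>
    let k := pvWalkB (c :: t) 0 1
    (c :: t).take k :: pvLoopB fuel ((c :: t).drop k)

def split_roman_to_phonemes_py_alt (roman_str : String) : List String :=
  let text := (PySem.Str.lower roman_str).toList
  (pvLoopB text.length text).map (fun cs => String.ofList cs)

-- ===== PRECONDITION & SPEC =====
def Spec_split_roman_to_phonemes_py (roman_str : String) (out : List String) : Prop := out = split_roman_to_phonemes_py_alt roman_str
instance (roman_str : String) (out : List String) : Decidable (Spec_split_roman_to_phonemes_py roman_str out) := by unfold Spec_split_roman_to_phonemes_py; infer_instance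

-- ===== CLAIM (what is proved, stated in full; the proofs are below) =====
def Claim_equal_split_roman_to_phonemes_py : Prop := ∀ (roman_str : String), Dom_split_roman_to_phonemes_py roman_str → Spec_split_roman_to_phonemes_py roman_str (split_roman_to_phonemes_py roman_str)

-- ===== LEMMAS AND PROOFS =====

-- The distinct patterns of each length, in A's (= first-occurrence) order.
def pvS4 : List (List Char) := [['x', 't', 's', 'u']]
def pvS3 : List (List Char) := [['c', 'h', 'i'], ['s', 'h', 'i'], ['t', 's', 'u'], ['k', 'y', 'o'], ['k', 'y', 'a'], ['k', 'y', 'u'], ['s', 'h', 'o'], ['s', 'h', 'a'], ['s', 'h', 'u'], ['c', 'h', 'o'], ['c', 'h', 'a'], ['c', 'h', 'u']]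
def pvS2 : List (List Char) := [['n', 'n'], ['k', 'o'], ['k', 'i'], ['k', 'a'], ['k', 'u'], ['w', 'a'], ['w', 'o'], ['n', 'a'], ['n', 'i'], ['n', 'u'], ['n', 'o'], ['t', 'a'], ['t', 'e'], ['t', 'o'], ['s', 'u'], ['m', 'a'], ['m', 'i'], ['m', 'o']]
def pvS1 : List (List Char) := [['n'], ['a'], ['i'], ['u'], ['e'], ['o']]

-- the literal values of B's word and prefix sets (first occurrences, in order)
def pvWordsLit : List (List Char) := [['x', 't', 's', 'u'], ['c', 'h', 'i'], ['s', 'h', 'i'], ['t', 's', 'u'], ['k', 'y', 'o'], ['k', 'y', 'a'], ['k', 'y', 'u'], ['s', 'h', 'o'], ['s', 'h', 'a'], ['s', 'h', 'u'], ['c', 'h', 'o'], ['c', 'h', 'a'], ['c', 'h', 'u'], ['n', 'n'], ['n'], ['k', 'o'], ['k', 'i'], ['k', 'a'], ['k', 'u'], ['w', 'a'], ['w', 'o'], ['n', 'a'], ['n', 'i'], ['n', 'u'], ['n', 'o'], ['t', 'a'], ['t', 'e'], ['t', 'o'], ['s', 'u'], ['m', 'a'], ['m', 'i'], ['m', 'o'],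 ['a'], ['i'], ['u'], ['e'], ['o']]
def pvPrefsLit : List (List Char) := [['x'], ['x', 't'], ['x', 't', 's'], ['x', 't', 's', 'u'], ['c'], ['c', 'h'], ['c', 'h', 'i'], ['s'], ['s', 'h'], ['s', 'h', 'i'], ['t'], ['t', 's'], ['t', 's', 'u'], ['k'], ['k', 'y'], ['k', 'y', 'o'], ['k', 'y', 'a'], ['k', 'y', 'u'], ['s', 'h', 'o'], ['s', 'h', 'a'], ['s', 'h', 'u'], ['c', 'h', 'o'], ['c', 'h', 'a'], ['c', 'h', 'u'], ['n'], ['n', 'n'], ['k', 'o'], ['k', 'i'], ['k', 'a'], ['k', 'u'], ['w'], ['w', 'a'], ['w', 'o'], ['n', 'a'], ['n', 'i'], ['n', 'u'], ['n', 'o'], ['t', 'a'], ['t', 'e'], ['t', 'o'], ['s', 'u'], ['m'], ['m', 'a'], ['m', 'i'], ['m', 'o'], ['a'], ['i'], ['u'], ['e'], ['o']]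

set_option maxRecDepth 8192 in
lemma pvSortedA_eq :
    pvSortedPatternsA = ([['x', 't', 's', 'u']] ++ ([['c', 'h', 'i'], ['s', 'h', 'i'], ['t', 's', 'u'], ['k', 'y', 'o'], ['k', 'y', 'a'], ['k', 'y', 'u'], ['s', 'h', 'o'], ['s', 'h', 'a'], ['s', 'h', 'u'], ['c', 'h', 'o'], ['c', 'h', 'a'], ['c', 'h', 'u'], ['c', 'h', 'i']] ++ ([['n', 'n'], ['k', 'o'], ['k', 'i'], ['k', 'a'], ['k', 'u'], ['w', 'a'], ['w', 'o'], ['n', 'a'], ['n', 'i'], ['n', 'u'], ['n', 'o'], ['t', 'a'], ['t', 'e'], ['t', 'o'], ['s', 'u'], ['m', 'a'], ['m', 'i'], ['m', 'o']] ++ ([['n'], ['a'], ['i'], ['u'], ['e'], ['o']] ++ []))) : List (List Char)) := by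
  decide

lemma pvLen4 : ∀ x ∈ pvS4, x.length = 4 := by decide
lemma pvLen3 : ∀ x ∈ pvS3, x.length = 3 := by decide
lemma pvLen2 : ∀ x ∈ pvS2, x.length = 2 := by decide

-- A's scan over a block of equal-length patterns is a membership test of the L-prefix.
lemma pvScanBlock (L : Nat) (ps qs : List (List Char)) (h : ∀ p ∈ ps, p.length = L)
    (t : List Char) :
    pvScanA (ps ++ qs) t = if t.take L ∈ ps then some (t.take L) else pvScanA qs t := by
  induction ps with
  | nil => simp
  | cons p ps ih =>
    have hp : p.length = L := h p (by simp)
    by_cases hc : t.take L = p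
    · have hpre : PySem.Chars.startswith t p = true := by
        rw [PySem.Chars.startswith_iff, List.prefix_iff_eq_take, hp, hc]
      simp [pvScanA, hpre, hc]
    · have hpre : PySem.Chars.startswith t p = false := by
        rw [Bool.eq_false_iff, Ne, PySem.Chars.startswith_iff, List.prefix_iff_eq_take, hp]
        exact fun hx => hc hx.symm
      have ih' := ih (fun q hq => h q (List.mem_cons_of_mem _ hq))
      simp [pvScanA, hpre, ih', List.mem_cons, hc]

-- A's full scan, characterised as four prefix-membership tests, longest first.
lemma pvScanA_eq (t : List Char) :
    pvScanA pvSortedPatternsA t =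
      if t.take 4 ∈ pvS4 then some (t.take 4)
      else if t.take 3 ∈ pvS3 then some (t.take 3)
      else if t.take 2 ∈ pvS2 then some (t.take 2)
      else if t.take 1 ∈ pvS1 then some (t.take 1)
      else none := by
  rw [pvSortedA_eq]
  rw [pvScanBlock 4 _ _ (by decide) t]
  rw [pvScanBlock 3 _ _ (by decide) t]
  rw [pvScanBlock 2 _ _ (by decide) t]
  rw [pvScanBlock 1 _ _ (by decide) t]
  simp only [pvScanA]
  have h3 : (List.take 3 t ∈ ([['c', 'h', 'i'], ['s', 'h', 'i'], ['t', 's', 'u'], ['k', 'y', 'o'], ['k', 'y', 'a'], ['k', 'y', 'u'], ['s', 'h', 'o'], ['s', 'h', 'a'], ['s', 'h', 'u'], ['c', 'h', 'o'], ['c', 'h', 'a'], ['c', 'h', 'u'], ['c', 'h', 'i']] : List (List Char)))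
      ↔ List.take 3 t ∈ pvS3 := by
    simp only [pvS3, List.mem_cons, List.not_mem_nil, or_false]
    tauto
  simp only [pvS4, pvS2, pvS1, h3]
  rfl

-- B-side walk: the two step shapes and the stop shape of the inner while loop.
lemma pvWalk_step (rest : List Char) (j best : Nat) (h1 : j < rest.length)
    (h2 : PySem.Set.contains pvPrefixesB (rest.take (j + 1)) = true) :
    pvWalkB rest j best =
      pvWalkB rest (j + 1) (if PySem.Set.contains pvWordsB (rest.take (j + 1)) = true then j + 1 else best) := by
  rw [pvWalkB]
  rw [dif_pos ⟨h1, h2⟩]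

lemma pvWalk_step_word (rest : List Char) (j best : Nat) (h1 : j < rest.length)
    (h2 : PySem.Set.contains pvPrefixesB (rest.take (j + 1)) = true)
    (h3 : PySem.Set.contains pvWordsB (rest.take (j + 1)) = true) :
    pvWalkB rest j best = pvWalkB rest (j + 1) (j + 1) := by
  rw [pvWalk_step rest j best h1 h2, if_pos h3]

lemma pvWalk_step_nonword (rest : List Char) (j best : Nat) (h1 : j < rest.length)
    (h2 : PySem.Set.contains pvPrefixesB (rest.take (j + 1)) = true)
    (h3 : PySem.Set.contains pvWordsB (rest.take (j + 1)) = false) :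
    pvWalkB rest j best = pvWalkB rest (j + 1) best := by
  rw [pvWalk_step rest j best h1 h2, h3]
  simp

lemma pvWalk_stop (rest : List Char) (j best : Nat)
    (h : ¬(j < rest.length ∧ PySem.Set.contains pvPrefixesB (rest.take (j + 1)) = true)) :
    pvWalkB rest j best = best := by
  rw [pvWalkB]
  rw [dif_neg h]

-- the value of the prefix set, as a literal list (first occurrences, in order)
set_option maxRecDepth 8192 in
lemma pvPrefixesB_eq : pvPrefixesB = pvPrefsLit := by
  decide

set_option maxRecDepth 8192 in
lemma pvWordsB_eq : pvWordsB = pvWordsLit := by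
  decide

-- finite facts about the word and prefix sets (all by decide)
set_option maxRecDepth 16384 in
lemma pvPrefs_len_le (x : List Char) (hc : PySem.Set.contains pvPrefixesB x = true) : x.length ≤ 4 := by
  rw [pvPrefixesB_eq, PySem.Set.contains_iff] at hc
  have key : ∀ y ∈ pvPrefsLit, y.length ≤ 4 := by decide
  exact key _ hc

set_option maxRecDepth 16384 in
lemma pvPrefs_no4_over_S3 (x : List Char) (hlen : x.length = 4) (h3 : x.take 3 ∈ pvS3) :
    PySem.Set.contains pvPrefixesB x = false := by
  by_contra hc
  rw [Bool.not_eq_false, pvPrefixesB_eq, PySem.Set.contains_iff] at hc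
  have key : ∀ y ∈ pvPrefsLit, y.length = 4 → y.take 3 ∈ pvS3 → False := by decide
  exact key _ hc hlen h3

set_option maxRecDepth 16384 in
lemma pvPrefs_no3_over_S2 (x : List Char) (hlen : x.length = 3) (h2 : x.take 2 ∈ pvS2) :
    PySem.Set.contains pvPrefixesB x = false := by
  by_contra hc
  rw [Bool.not_eq_false, pvPrefixesB_eq, PySem.Set.contains_iff] at hc
  have key : ∀ y ∈ pvPrefsLit, y.length = 3 → y.take 2 ∈ pvS2 → False := by decide
  exact key _ hc hlen h2

set_option maxRecDepth 16384 in
lemma pvWords_len2 (x : List Char) (hlen : x.length = 2) (h : x ∉ pvS2) :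
    PySem.Set.contains pvWordsB x = false := by
  by_contra hc
  rw [Bool.not_eq_false, pvWordsB_eq, PySem.Set.contains_iff] at hc
  have key : ∀ y ∈ pvWordsLit, y.length = 2 → y ∈ pvS2 := by decide
  exact h (key _ hc hlen)

set_option maxRecDepth 16384 in
lemma pvWords_len3 (x : List Char) (hlen : x.length = 3) (h : x ∉ pvS3) :
    PySem.Set.contains pvWordsB x = false := by
  by_contra hc
  rw [Bool.not_eq_false, pvWordsB_eq, PySem.Set.contains_iff] at hc
  have key : ∀ y ∈ pvWordsLit, y.length = 3 → y ∈ pvS3 := by decide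
  exact h (key _ hc hlen)

set_option maxRecDepth 16384 in
lemma pvWords_len4 (x : List Char) (hlen : x.length = 4) (h : x ∉ pvS4) :
    PySem.Set.contains pvWordsB x = false := by
  by_contra hc
  rw [Bool.not_eq_false, pvWordsB_eq, PySem.Set.contains_iff] at hc
  have key : ∀ y ∈ pvWordsLit, y.length = 4 → y ∈ pvS4 := by decide
  exact h (key _ hc hlen)

-- per-length facts about the prefixes of the patterns themselves
set_option maxRecDepth 16384 in
lemma pvS4_p : ∀ w ∈ pvS4, PySem.Set.contains pvPrefixesB (w.take 1) = true ∧
    PySem.Set.contains pvPrefixesB (w.take 2) = true ∧ PySem.Set.contains pvPrefixesB (w.take 3) = true ∧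
    PySem.Set.contains pvPrefixesB w = true ∧ PySem.Set.contains pvWordsB (w.take 2) = false ∧
    PySem.Set.contains pvWordsB (w.take 3) = false ∧ PySem.Set.contains pvWordsB w = true := by decide

set_option maxRecDepth 16384 in
lemma pvS3_p : ∀ w ∈ pvS3, PySem.Set.contains pvPrefixesB (w.take 1) = true ∧
    PySem.Set.contains pvPrefixesB (w.take 2) = true ∧ PySem.Set.contains pvPrefixesB w = true ∧
    PySem.Set.contains pvWordsB (w.take 2) = false ∧ PySem.Set.contains pvWordsB w = true := by decide

set_option maxRecDepth 16384 in
lemma pvS2_p : ∀ w ∈ pvS2, PySem.Set.contains pvPrefixesB (w.take 1) = true ∧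
    PySem.Set.contains pvPrefixesB w = true ∧ PySem.Set.contains pvWordsB w = true := by decide

-- collapse of the best update at j = 0 (j + 1 = 1 = the initial best, either way)
lemma pvWalk_first (c : Char) (t : List Char)
    (h : PySem.Set.contains pvPrefixesB ((c :: t).take 1) = true) :
    pvWalkB (c :: t) 0 1 = pvWalkB (c :: t) 1 1 := by
  rw [pvWalk_step (c :: t) 0 1 (by simp) h]
  split <;> rfl

lemma pvTakeTake (l : List Char) (m n : Nat) (h : m ≤ n) : (l.take n).take m = l.take m := by
  rw [List.take_take, Nat.min_eq_left h]

-- the walk on a suffix starting with a 4-pattern returns 4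
lemma pvWalk_S4 (c : Char) (t : List Char) (h4 : (c :: t).take 4 ∈ pvS4) :
    pvWalkB (c :: t) 0 1 = 4 := by
  obtain ⟨p1, p2, p3, p4, w2, w3, w4⟩ := pvS4_p _ h4
  have hlen4 : ((c :: t).take 4).length = 4 := pvLen4 _ h4
  have hlen : 4 ≤ (c :: t).length := by rw [List.length_take] at hlen4; omega
  have e1 : ((c :: t).take 4).take 1 = (c :: t).take 1 := pvTakeTake _ 1 4 (by omega)
  have e2 : ((c :: t).take 4).take 2 = (c :: t).take 2 := pvTakeTake _ 2 4 (by omega)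
  have e3 : ((c :: t).take 4).take 3 = (c :: t).take 3 := pvTakeTake _ 3 4 (by omega)
  rw [e1] at p1; rw [e2] at p2; rw [e2] at w2; rw [e3] at p3; rw [e3] at w3
  rw [pvWalk_first c t p1]
  rw [pvWalk_step_nonword _ 1 1 (by omega) p2 w2]
  rw [pvWalk_step_nonword _ 2 1 (by omega) p3 w3]
  rw [pvWalk_step_word _ 3 1 (by omega) p4 w4]
  rw [pvWalk_stop]
  rintro ⟨hl, hc⟩
  have h5 : ((c :: t).take 5).length = 5 := by rw [List.length_take]; omega
  have := pvPrefs_len_le _ hc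
  rw [h5] at this
  omega

-- the walk on a suffix starting with a 3-pattern (not extendable to a 4-pattern) returns 3
lemma pvWalk_S3 (c : Char) (t : List Char) (h3 : (c :: t).take 3 ∈ pvS3) :
    pvWalkB (c :: t) 0 1 = 3 := by
  obtain ⟨p1, p2, p3, w2, w3⟩ := pvS3_p _ h3
  have hlen3 : ((c :: t).take 3).length = 3 := pvLen3 _ h3
  have hlen : 3 ≤ (c :: t).length := by rw [List.length_take] at hlen3; omega
  have e1 : ((c :: t).take 3).take 1 = (c :: t).take 1 := pvTakeTake _ 1 3 (by omega)
  have e2 : ((c :: t).take 3).take 2 = (c :: t).take 2 := pvTakeTake _ 2 3 (by omega)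
  rw [e1] at p1; rw [e2] at p2; rw [e2] at w2
  rw [pvWalk_first c t p1]
  rw [pvWalk_step_nonword _ 1 1 (by omega) p2 w2]
  rw [pvWalk_step_word _ 2 1 (by omega) p3 w3]
  rw [pvWalk_stop]
  rintro ⟨hl, hc⟩
  have h4l : ((c :: t).take 4).length = 4 := by rw [List.length_take]; omega
  have e3 : ((c :: t).take 4).take 3 = (c :: t).take 3 := pvTakeTake _ 3 4 (by omega)
  have := pvPrefs_no4_over_S3 _ h4l (by rw [e3]; exact h3)
  rw [this] at hc
  exact absurd hc (by simp)

-- the walk on a suffix starting with a 2-pattern (not extendable to a longer one) returns 2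
lemma pvWalk_S2 (c : Char) (t : List Char) (h2 : (c :: t).take 2 ∈ pvS2) :
    pvWalkB (c :: t) 0 1 = 2 := by
  obtain ⟨p1, p2, w2⟩ := pvS2_p _ h2
  have hlen2 : ((c :: t).take 2).length = 2 := pvLen2 _ h2
  have hlen : 2 ≤ (c :: t).length := by rw [List.length_take] at hlen2; omega
  have e1 : ((c :: t).take 2).take 1 = (c :: t).take 1 := pvTakeTake _ 1 2 (by omega)
  rw [e1] at p1
  rw [pvWalk_first c t p1]
  rw [pvWalk_step_word _ 1 1 (by omega) p2 w2]
  rw [pvWalk_stop]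
  rintro ⟨hl, hc⟩
  have h3l : ((c :: t).take 3).length = 3 := by rw [List.length_take]; omega
  have e2 : ((c :: t).take 3).take 2 = (c :: t).take 2 := pvTakeTake _ 2 3 (by omega)
  have := pvPrefs_no3_over_S2 _ h3l (by rw [e2]; exact h2)
  rw [this] at hc
  exact absurd hc (by simp)

-- otherwise the walk keeps the single-character fallback
lemma pvWalk_else (c : Char) (t : List Char) (h4 : (c :: t).take 4 ∉ pvS4) (h3 : (c :: t).take 3 ∉ pvS3)
    (h2 : (c :: t).take 2 ∉ pvS2) :
    pvWalkB (c :: t) 0 1 = 1 := by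
  by_cases q0 : PySem.Set.contains pvPrefixesB ((c :: t).take 1) = true
  case neg => exact pvWalk_stop _ 0 1 (by rintro ⟨_, hc⟩; exact q0 hc)
  rw [pvWalk_first c t q0]
  by_cases q1 : 1 < (c :: t).length ∧ PySem.Set.contains pvPrefixesB ((c :: t).take 2) = true
  case neg => exact pvWalk_stop _ 1 1 q1
  obtain ⟨l1, hp1⟩ := q1
  have hw2 : PySem.Set.contains pvWordsB ((c :: t).take 2) = false :=
    pvWords_len2 _ (by rw [List.length_take]; omega) h2
  rw [pvWalk_step_nonword _ 1 1 l1 hp1 hw2]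
  by_cases q2 : 2 < (c :: t).length ∧ PySem.Set.contains pvPrefixesB ((c :: t).take 3) = true
  case neg => exact pvWalk_stop _ 2 1 q2
  obtain ⟨l2, hp2⟩ := q2
  have hw3 : PySem.Set.contains pvWordsB ((c :: t).take 3) = false :=
    pvWords_len3 _ (by rw [List.length_take]; omega) h3
  rw [pvWalk_step_nonword _ 2 1 l2 hp2 hw3]
  by_cases q3 : 3 < (c :: t).length ∧ PySem.Set.contains pvPrefixesB ((c :: t).take 4) = true
  case neg => exact pvWalk_stop _ 3 1 q3
  obtain ⟨l3, hp3⟩ := q3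
  have hw4 : PySem.Set.contains pvWordsB ((c :: t).take 4) = false :=
    pvWords_len4 _ (by rw [List.length_take]; omega) h4
  rw [pvWalk_step_nonword _ 3 1 l3 hp3 hw4]
  rw [pvWalk_stop]
  rintro ⟨hl, hc⟩
  have h5 : ((c :: t).take 5).length = 5 := by rw [List.length_take]; omega
  have := pvPrefs_len_le _ hc
  rw [h5] at this
  omega

-- the two loops agree step by step
lemma pvLoop_eq : ∀ fuel rest, pvLoopA fuel rest = pvLoopB fuel rest := by
  intro fuel
  induction fuel with
  | zero => intro rest; rfl
  | succ n ih =>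
    intro rest
    cases rest with
    | nil => rfl
    | cons c t =>
      have hb : pvLoopB (n + 1) (c :: t) =
          (c :: t).take (pvWalkB (c :: t) 0 1) :: pvLoopB n ((c :: t).drop (pvWalkB (c :: t) 0 1)) := rfl
      rw [pvLoopA, hb, pvScanA_eq]
      by_cases h4 : (c :: t).take 4 ∈ pvS4
      · rw [if_pos h4, pvWalk_S4 c t h4]
        simp only [pvLen4 _ h4, ih]
      · rw [if_neg h4]
        by_cases h3 : (c :: t).take 3 ∈ pvS3
        · rw [if_pos h3, pvWalk_S3 c t h3]
          simp only [pvLen3 _ h3, ih]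
        · rw [if_neg h3]
          by_cases h2 : (c :: t).take 2 ∈ pvS2
          · rw [if_pos h2, pvWalk_S2 c t h2]
            simp only [pvLen2 _ h2, ih]
          · rw [if_neg h2, pvWalk_else c t h4 h3 h2]
            by_cases h1 : (c :: t).take 1 ∈ pvS1
            · rw [if_pos h1]
              simp only [ih, List.take_succ_cons, List.take_zero, List.length_cons,
                List.length_nil, List.drop_succ_cons, List.drop_zero]
            · rw [if_neg h1]
              simp only [ih, List.take_succ_cons, List.take_zero,
                List.drop_succ_cons, List.drop_zero]

-- ===== VERDICT (by name: the statement is the Claim_ definition above) =====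
theorem split_roman_to_phonemes_py_spec : Claim_equal_split_roman_to_phonemes_py := by
  intro roman_str _
  unfold Spec_split_roman_to_phonemes_py
  simp only [split_roman_to_phonemes_py, split_roman_to_phonemes_py_alt, pvLoop_eq]
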